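-- pv_equiv track=rewrite | github.com/PrimeNodeSVX/PrimeNode_RPI0W-Update | update_svx_full.py | sanitize_lines
-- ===== SOURCE A (Python) =====
-- def sanitize_lines(lines):
--     seen_headers = set()
--     clean_lines = []
--     skip_mode = False
--     for line in lines:
--         stripped = line.strip()
--         if stripped.startswith("[") and stripped.endswith("]"):
--             if stripped in seen_headers:
--                 skip_mode = True
--             else:
--                 seen_headers.add(stripped)
--                 skip_mode = False
--                 clean_lines.append(line)
--         else:
--             if not skip_mode:
--                 clean_lines.append(line)
--     return clean_lines
-- ===== SOURCE B (Python) =====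
-- def sanitize_lines(lines):
--     def is_header(line):
--         s = line.strip()
--         return s.startswith("[") and s.endswith("]")
--     # Pass 1: split into chunks; first chunk is the preamble, each later
--     # chunk starts with its header line.
--     sections = []
--     current = []
--     for line in lines:
--         if is_header(line):
--             sections.append(current)
--             current = [line]
--         else:
--             current.append(line)
--     sections.append(current)
--     # Pass 2: always keep the preamble; keep each later chunk whole only if
--     # its (stripped) header has not been seen yet.
--     out = list(sections[0])
--     seen = set()
--     for chunk in sections[1:]:
--         h = chunk[0].strip()
--         if h not in seen:
--             seen.add(h)
--             out.extend(chunk)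
--     return out
-- ===== Notes on version B (the rewrite author's own statement) =====
-- stated objective: alternative
-- what changed: B splits the input into header-delimited sections in a first pass and then emits the preamble plus each section whose stripped header is unseen, instead of A's single pass with a skip_mode flag.
import Mathlib
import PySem

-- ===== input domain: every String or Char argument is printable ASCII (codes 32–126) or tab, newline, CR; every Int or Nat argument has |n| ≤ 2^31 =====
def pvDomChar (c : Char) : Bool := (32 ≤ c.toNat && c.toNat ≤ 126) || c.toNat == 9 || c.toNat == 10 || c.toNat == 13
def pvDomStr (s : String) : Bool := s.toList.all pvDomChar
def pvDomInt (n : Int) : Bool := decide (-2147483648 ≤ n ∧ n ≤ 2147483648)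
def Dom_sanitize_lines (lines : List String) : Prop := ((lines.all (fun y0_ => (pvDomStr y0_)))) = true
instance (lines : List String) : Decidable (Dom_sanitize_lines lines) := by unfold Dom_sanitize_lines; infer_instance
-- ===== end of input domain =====

-- B replaces A's single-pass skip_mode scan by a split-into-sections pass followed by a
-- keep-first-occurrence filter over whole sections (objective: alternative decomposition,
-- same cost). Return values only; neither version mutates its argument.

-- ===== PORT A =====
-- the loop body of A, one step of the for-loop over `lines`
def pvStepA (st : PySem.Set String × List String × Bool) (line : String) :
    PySem.Set String × List String × Bool :=
  let stripped := PySem.Str.strip line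
  if PySem.Str.startswith stripped "[" && PySem.Str.endswith stripped "]" then
    if PySem.Set.contains st.1 stripped then (st.1, st.2.1, true)
    else (PySem.Set.add st.1 stripped, st.2.1 ++ [line], false)
  else
    if !st.2.2 then (st.1, st.2.1 ++ [line], st.2.2) else st

def sanitize_lines (lines : List String) : List String :=
  (lines.foldl pvStepA (PySem.Set.empty, [], false)).2.1

-- ===== PORT B =====
-- B's helper is_header
def pvIsHeader (line : String) : Bool :=
  let s := PySem.Str.strip line
  PySem.Str.startswith s "[" && PySem.Str.endswith s "]"

-- pass 1 loop body: flush current chunk on a header line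
def pvGStep (st : List (List String) × List String) (line : String) :
    List (List String) × List String :=
  if pvIsHeader line then (st.1 ++ [st.2], [line]) else (st.1, st.2 ++ [line])

-- pass 2 loop body: keep a section iff its stripped header is unseen
def pvRStep (st : List String × PySem.Set String) (chunk : List String) :
    List String × PySem.Set String :=
  let h := PySem.Str.strip (chunk.headD "")  -- chunk[0]; every chunk after the preamble starts with its header, never empty
  if PySem.Set.contains st.2 h then st else (st.1 ++ chunk, PySem.Set.add st.2 h)

def sanitize_lines_alt (lines : List String) : List String :=
  let g := lines.foldl pvGStep ([], [])
  let sections := g.1 ++ [g.2]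
  let out0 := sections.headD []          -- sections[0]; sections is nonempty by construction
  let rest := sections.tail              -- sections[1:]
  (rest.foldl pvRStep (out0, PySem.Set.empty)).1

-- ===== PRECONDITION & SPEC =====
def Spec_sanitize_lines (lines : List String) (out : List String) : Prop := out = sanitize_lines_alt lines
instance (lines : List String) (out : List String) : Decidable (Spec_sanitize_lines lines out) := by unfold Spec_sanitize_lines; infer_instance

-- ===== CLAIM (what is proved, stated in full; the proofs are below) =====
def Claim_equal_sanitize_lines : Prop := ∀ (lines : List String), Dom_sanitize_lines lines → Spec_sanitize_lines lines (sanitize_lines lines)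

-- ===== LEMMAS AND PROOFS =====

-- recursive characterisation of A's loop (seen set, skip flag)
def fA (seen : PySem.Set String) (skip : Bool) : List String → List String
  | [] => []
  | l :: t =>
    let s := PySem.Str.strip l
    if PySem.Str.startswith s "[" && PySem.Str.endswith s "]" then
      if PySem.Set.contains seen s then fA seen true t
      else l :: fA (PySem.Set.add seen s) false t
    else if skip then fA seen skip t else l :: fA seen skip t

-- the chunks after the preamble, takeWhile/dropWhile form
def chunksOf : List String → List (List String)
  | [] => []
  | l :: t =>
      (l :: t.takeWhile (fun x => !pvIsHeader x)) ::
        chunksOf (t.dropWhile (fun x => !pvIsHeader x))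
termination_by ls => ls.length
decreasing_by
  simpa using Nat.lt_succ_of_le (List.Sublist.length_le (List.dropWhile_sublist _))

-- recursive characterisation of B's second pass
def renderR (seen : PySem.Set String) : List (List String) → List String
  | [] => []
  | c :: cs =>
    let h := PySem.Str.strip (c.headD "")
    if PySem.Set.contains seen h then renderR seen cs
    else c ++ renderR (PySem.Set.add seen h) cs

theorem foldA_eq (t : List String) :
    ∀ seen clean skip, (t.foldl pvStepA (seen, clean, skip)).2.1 = clean ++ fA seen skip t := by
  induction t with
  | nil => intro seen clean skip; simp [fA]
  | cons l t ih =>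
      intro seen clean skip
      simp only [List.foldl_cons, pvStepA, fA]
      split_ifs <;> simp [ih] <;> cases skip <;> simp_all [ih]

theorem gfold_append (t : List String) :
    ∀ secs cur, t.foldl pvGStep (secs, cur) =
      (secs ++ (t.foldl pvGStep ([], cur)).1, (t.foldl pvGStep ([], cur)).2) := by
  induction t with
  | nil => intro secs cur; simp
  | cons l t ih =>
      intro secs cur
      simp only [List.foldl_cons, pvGStep]
      split_ifs with h
      · simp only [List.nil_append]
        rw [ih (secs ++ [cur]) [l], ih [cur] [l]]; simp
      · exact ih secs (cur ++ [l])

theorem gfold_sections (t : List String) :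
    ∀ cur, (t.foldl pvGStep ([], cur)).1 ++ [(t.foldl pvGStep ([], cur)).2] =
      (cur ++ t.takeWhile (fun x => !pvIsHeader x)) ::
        chunksOf (t.dropWhile (fun x => !pvIsHeader x)) := by
  induction t with
  | nil => intro cur; simp [chunksOf]
  | cons l t ih =>
      intro cur
      simp only [List.foldl_cons, pvGStep]
      by_cases h : pvIsHeader l
      · simp only [h, if_pos, List.nil_append]
        rw [gfold_append t [cur] [l]]
        simp only [List.takeWhile_cons, List.dropWhile_cons, h]
        simpa [chunksOf, h] using ih [l]
      · simp only [h, if_neg, Bool.false_eq_true, not_false_iff]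
        simp only [List.takeWhile_cons, List.dropWhile_cons, h]
        simpa using ih (cur ++ [l])

theorem rfold_eq (cs : List (List String)) :
    ∀ out seen, (cs.foldl pvRStep (out, seen)).1 = out ++ renderR seen cs := by
  induction cs with
  | nil => intro out seen; simp [renderR]
  | cons c cs ih =>
      intro out seen
      simp only [List.foldl_cons, pvRStep, renderR]
      split_ifs with h <;> simp [ih]

theorem fA_true_drop (t : List String) :
    ∀ seen, fA seen true t = fA seen true (t.dropWhile (fun x => !pvIsHeader x)) := by
  induction t with
  | nil => intro seen; simp
  | cons l t ih =>
      intro seen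
      by_cases h : pvIsHeader l
      · simp [List.dropWhile_cons, h]
      · have h' : ¬ (PySem.Str.startswith (PySem.Str.strip l) "[" &&
            PySem.Str.endswith (PySem.Str.strip l) "]") = true := by
          simpa [pvIsHeader] using h
        simp only [fA, List.dropWhile_cons, h]
        simp only [h', if_neg, if_pos, Bool.not_eq_true]
        simpa using ih seen

theorem fA_false_take (t : List String) :
    ∀ seen, fA seen false t =
      t.takeWhile (fun x => !pvIsHeader x) ++ fA seen false (t.dropWhile (fun x => !pvIsHeader x)) := by
  induction t with
  | nil => intro seen; simp
  | cons l t ih =>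
      intro seen
      by_cases h : pvIsHeader l
      · simp [List.takeWhile_cons, List.dropWhile_cons, h]
      · have h' : ¬ (PySem.Str.startswith (PySem.Str.strip l) "[" &&
            PySem.Str.endswith (PySem.Str.strip l) "]") = true := by
          simpa [pvIsHeader] using h
        simp only [fA, List.takeWhile_cons, List.dropWhile_cons, h]
        rw [if_neg h']
        simp [ih seen]

theorem dropWhile_header (t : List String) :
    t.dropWhile (fun x => !pvIsHeader x) = [] ∨
      ∃ l t', t.dropWhile (fun x => !pvIsHeader x) = l :: t' ∧ pvIsHeader l = true := by
  induction t with
  | nil => left; rfl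
  | cons l t ih =>
      by_cases h : pvIsHeader l
      · right; exact ⟨l, t, by simp [List.dropWhile_cons, h], h⟩
      · simpa [List.dropWhile_cons, h] using ih

theorem fA_render (n : ℕ) : ∀ rest : List String, rest.length ≤ n →
    (rest = [] ∨ ∃ l t', rest = l :: t' ∧ pvIsHeader l = true) →
    ∀ seen skip, fA seen skip rest = renderR seen (chunksOf rest) := by
  induction n with
  | zero =>
      intro rest hlen _ seen skip
      have : rest = [] := List.length_eq_zero_iff.mp (Nat.le_zero.mp hlen)
      subst this; simp [fA, chunksOf, renderR]
  | succ n ih =>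
      intro rest hlen hshape seen skip
      rcases hshape with h0 | ⟨l, t', rfl, hl⟩
      · subst h0; simp [fA, chunksOf, renderR]
      · have hl' : (PySem.Str.startswith (PySem.Str.strip l) "[" &&
            PySem.Str.endswith (PySem.Str.strip l) "]") = true := by
          simpa [pvIsHeader] using hl
        have hdw : (t'.dropWhile (fun x => !pvIsHeader x)).length ≤ n := by
          have h1 := List.Sublist.length_le (List.dropWhile_sublist (l := t') (p := fun x => !pvIsHeader x))
          simp only [List.length_cons] at hlen; omega
        have hsh := dropWhile_header t'
        simp only [fA, chunksOf, renderR, List.headD_cons, hl', if_pos]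
        by_cases hc : PySem.Set.contains seen (PySem.Str.strip l)
        · simp only [hc, if_pos]
          rw [fA_true_drop t' seen]
          exact ih _ hdw hsh seen true
        · simp only [hc, if_neg, Bool.false_eq_true, not_false_iff]
          rw [fA_false_take t' (PySem.Set.add seen (PySem.Str.strip l))]
          rw [ih _ hdw hsh (PySem.Set.add seen (PySem.Str.strip l)) false]
          simp

-- ===== VERDICT (by name: the statement is the Claim_ definition above) =====
theorem sanitize_lines_spec : Claim_equal_sanitize_lines := by
  intro lines _
  unfold Spec_sanitize_lines sanitize_lines sanitize_lines_alt
  rw [foldA_eq]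
  have hg := gfold_sections lines []
  simp only [List.nil_append] at hg
  -- rewrite sections
  have hsec1 : ((lines.foldl pvGStep ([], [])).1 ++ [(lines.foldl pvGStep ([], [])).2]).headD []
      = lines.takeWhile (fun x => !pvIsHeader x) := by rw [hg]; rfl
  have hsec2 : ((lines.foldl pvGStep ([], [])).1 ++ [(lines.foldl pvGStep ([], [])).2]).tail
      = chunksOf (lines.dropWhile (fun x => !pvIsHeader x)) := by rw [hg]; rfl
  simp only [hsec1, hsec2, rfold_eq]
  rw [fA_false_take lines PySem.Set.empty]
  rw [fA_render (lines.dropWhile (fun x => !pvIsHeader x)).length _ le_rfl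
       (dropWhile_header lines) PySem.Set.empty false]
  simp
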